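-- pv_equiv track=rewrite | github.com/eytans/TheSy | frontend/benchmarks/isaplanner/via_hipster/result_analyzer.py | getLemmasAndErrors
-- ===== SOURCE A (Python) =====
-- def countQuotes(line):
--     counter = 0
--     for letter in line:
--         if letter == '"':
--             counter += 1
--     return counter
--
-- def getLemmasAndErrors(logFile):
--     lemmaList = []
--     unknownList = []
--     midLemma = False
--     midUnknown = False
--     currLemma = ""
--     for line in logFile:
--         if midLemma:
--             currLemma += line
--             lemmaList.append(currLemma)
--             currLemma = ""
--             midLemma = False
--             continue
--         if midUnknown:
--             currLemma += line
--             unknownList.append(currLemma)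
--             currLemma = ""
--             midUnknown = False
--             continue
--         if "lemma lemma" in line:
--             if countQuotes(line) == 1:
--                 currLemma += line
--                 midLemma = True
--                 continue
--             lemmaList.append(line)
--         if "lemma unknown" in line:
--             if countQuotes(line) == 1:
--                 currLemma += line
--                 midUnknown = True
--                 continue
--
--     return (lemmaList,unknownList)
-- ===== SOURCE B (Python) =====
-- def getLemmasAndErrors(logFile):
--     lemmaList = []
--     unknownList = []
--     it = iter(logFile)
--     for line in it:
--         if "lemma lemma" in line:
--             if line.count('"') == 1:
--                 nxt = next(it, None)
--                 if nxt is not None: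
--                     lemmaList.append(line + nxt)
--             else:
--                 lemmaList.append(line)
--         elif "lemma unknown" in line and line.count('"') == 1:
--             nxt = next(it, None)
--             if nxt is not None:
--                 unknownList.append(line + nxt)
--     return (lemmaList, unknownList)
-- ===== Notes on version B (the rewrite author's own statement) =====
-- stated objective: simpler
-- what changed: Replaces A's midLemma/midUnknown boolean state and currLemma accumulator carried across loop iterations by inline lookahead: on a one-quote record line B consumes the next line of the iterator directly and appends the concatenation, dropping a pending record at end-of-input just as A does.
import Mathlib
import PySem

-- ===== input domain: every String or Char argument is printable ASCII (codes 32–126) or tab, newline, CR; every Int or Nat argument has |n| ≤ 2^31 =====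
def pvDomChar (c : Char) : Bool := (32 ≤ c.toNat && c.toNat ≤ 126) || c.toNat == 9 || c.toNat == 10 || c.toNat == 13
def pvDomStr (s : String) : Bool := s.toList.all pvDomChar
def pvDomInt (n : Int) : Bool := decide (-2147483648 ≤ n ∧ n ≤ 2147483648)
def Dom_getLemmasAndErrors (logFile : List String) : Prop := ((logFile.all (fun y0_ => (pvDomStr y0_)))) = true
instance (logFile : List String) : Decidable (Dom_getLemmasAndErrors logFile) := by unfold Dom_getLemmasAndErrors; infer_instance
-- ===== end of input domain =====

-- B replaces the midLemma/midUnknown boolean state threaded through A's loop by inline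
-- lookahead: on a one-quote record line it consumes the next line directly (objective: simpler).

-- ===== PORT A =====
def countQuotes (line : String) : Nat :=
  line.toList.foldl (fun counter letter => if letter = '"' then counter + 1 else counter) 0

-- A's for-loop, state (lemmaList, unknownList, midLemma, midUnknown, currLemma) carried through recursion
def getLemmasAndErrorsLoop : List String → List String → List String → Bool → Bool → String → List String × List String
  | [], lemmaList, unknownList, _, _, _ => (lemmaList, unknownList)
  | line :: rest, lemmaList, unknownList, midLemma, midUnknown, currLemma =>
    if midLemma then
      getLemmasAndErrorsLoop rest (lemmaList ++ [currLemma ++ line]) unknownList false false ""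
    else if midUnknown then
      getLemmasAndErrorsLoop rest lemmaList (unknownList ++ [currLemma ++ line]) false false ""
    else if PySem.Str.isIn "lemma lemma" line then
      if countQuotes line = 1 then
        getLemmasAndErrorsLoop rest lemmaList unknownList true midUnknown (currLemma ++ line)
      else
        -- appended to lemmaList, then control falls through to the "lemma unknown" test
        if PySem.Str.isIn "lemma unknown" line then
          if countQuotes line = 1 then
            getLemmasAndErrorsLoop rest (lemmaList ++ [line]) unknownList midLemma true (currLemma ++ line)
          else getLemmasAndErrorsLoop rest (lemmaList ++ [line]) unknownList midLemma midUnknown currLemma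
        else getLemmasAndErrorsLoop rest (lemmaList ++ [line]) unknownList midLemma midUnknown currLemma
    else if PySem.Str.isIn "lemma unknown" line then
      if countQuotes line = 1 then
        getLemmasAndErrorsLoop rest lemmaList unknownList midLemma true (currLemma ++ line)
      else getLemmasAndErrorsLoop rest lemmaList unknownList midLemma midUnknown currLemma
    else getLemmasAndErrorsLoop rest lemmaList unknownList midLemma midUnknown currLemma

def getLemmasAndErrors (logFile : List String) : List String × List String :=
  getLemmasAndErrorsLoop logFile [] [] false false ""

-- ===== PORT B =====
-- B's loop with inline lookahead: a one-quote record line consumes the next line of the iterator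
def getLemmasAndErrorsAltGo : List String → List String × List String
  | [] => ([], [])
  | line :: rest =>
    if PySem.Str.isIn "lemma lemma" line then
      if PySem.Str.count line "\"" == 1 then
        match rest with
        | [] => ([], [])          -- next(it, None) is None: pending record dropped
        | nxt :: rest' =>
          let (ls, us) := getLemmasAndErrorsAltGo rest'
          ((line ++ nxt) :: ls, us)
      else
        let (ls, us) := getLemmasAndErrorsAltGo rest
        (line :: ls, us)
    else if PySem.Str.isIn "lemma unknown" line && PySem.Str.count line "\"" == 1 then
      match rest with
      | [] => ([], [])
      | nxt :: rest' =>
        let (ls, us) := getLemmasAndErrorsAltGo rest'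
        (ls, (line ++ nxt) :: us)
    else getLemmasAndErrorsAltGo rest
termination_by l => l.length
decreasing_by all_goals simp [List.length_cons]

def getLemmasAndErrors_alt (logFile : List String) : List String × List String :=
  getLemmasAndErrorsAltGo logFile

-- ===== PRECONDITION & SPEC =====
def Spec_getLemmasAndErrors (logFile : List String) (out : List String × List String) : Prop := out = getLemmasAndErrors_alt logFile
instance (logFile : List String) (out : List String × List String) : Decidable (Spec_getLemmasAndErrors logFile out) := by unfold Spec_getLemmasAndErrors; infer_instance

-- ===== CLAIM (what is proved, stated in full; the proofs are below) =====
def Claim_equal_getLemmasAndErrors : Prop := ∀ (logFile : List String), Dom_getLemmasAndErrors logFile → Spec_getLemmasAndErrors logFile (getLemmasAndErrors logFile)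

-- ===== LEMMAS AND PROOFS =====

-- A's hand-rolled quote counter agrees with B's str.count('"')
theorem countGo_singleton (cs : List Char) : ∀ (fuel acc : Nat), cs.length ≤ fuel →
    PySem.Chars.count.go ['"'] fuel cs acc = acc + cs.count '"' := by
  induction cs with
  | nil => intro fuel acc _; cases fuel <;> simp [PySem.Chars.count.go]
  | cons c cs ih =>
    intro fuel acc h
    cases fuel with
    | zero => simp at h
    | succ f =>
      have hf : cs.length ≤ f := by simpa using h
      simp only [PySem.Chars.count.go]
      by_cases hc : c = '"'
      · subst hc
        simp [List.isPrefixOf, ih f (acc+1) hf]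
        omega
      · simp [List.isPrefixOf, hc, ih f acc hf]
        exact fun h' => absurd h'.symm hc

theorem count_quote (s : String) : PySem.Str.count s "\"" = s.toList.count '"' := by
  have := countGo_singleton s.toList s.toList.length 0 (le_refl _)
  simp only [PySem.Str.count, PySem.Chars.count]
  simpa using this

theorem foldl_countq (cs : List Char) : ∀ (acc : Nat),
    cs.foldl (fun counter letter => if letter = '"' then counter + 1 else counter) acc = acc + cs.count '"' := by
  induction cs with
  | nil => intro acc; simp
  | cons c cs ih =>
    intro acc
    by_cases hc : c = '"'
    · simp [hc, ih]; omega
    · simp [hc, ih]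

theorem countQuotes_eq (s : String) : countQuotes s = PySem.Str.count s "\"" := by
  rw [count_quote]
  simpa using foldl_countq s.toList 0

theorem loop_eq_altGo (l : List String) : ∀ (la ua : List String),
    getLemmasAndErrorsLoop l la ua false false "" =
      (la ++ (getLemmasAndErrorsAltGo l).1, ua ++ (getLemmasAndErrorsAltGo l).2) := by
  fun_induction getLemmasAndErrorsAltGo l with
  | case1 => intro la ua; simp [getLemmasAndErrorsLoop]
  | _ => intro la ua; simp_all [getLemmasAndErrorsLoop, countQuotes_eq]

-- ===== VERDICT (by name: the statement is the Claim_ definition above) =====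
theorem getLemmasAndErrors_spec : Claim_equal_getLemmasAndErrors := by
  intro logFile _
  unfold Spec_getLemmasAndErrors getLemmasAndErrors getLemmasAndErrors_alt
  simpa using loop_eq_altGo logFile [] []
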